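-- pv_equiv track=rewrite | github.com/pypi-data/pypi-mirror-324 | packages/efj-parser/efj_parser-0.9.3.tar.gz/efj_parser-0.9.3/efj_parser/__init__.py | _process_roles
-- ===== SOURCE A (Python) =====
-- from typing import NamedTuple, Optional, Callable, Union, cast
--
-- class Roles(NamedTuple):
--     p1: int = 0  #: Minutes operating as p1
--     p1s: int = 0  #: Minutes operating as p1s
--     p2: int = 0  #: Minutes operating as p2
--     put: int = 0  #: Minutes operating as put
--     instructor: int = 0  #: Minutes operating as instructor
--
-- class _VE(Exception):
--
--     def __init__(self, message): self.message = message
--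
-- Flag = tuple[str, Optional[int]]
--
-- Flags = tuple[Flag, ...]
--
-- def _process_roles(flags: Flags, duration: int) -> tuple[Roles, Flags]:
--     """Extract role durations from sector flags
--
--     :param flags: Sector flags
--     :param duration: Total duration of sector
--     :return: A Roles object and the flags input parameter with processed flags
--         removed.
--     """
--     p1s, p2, put, p0, ins = 0, 0, 0, 0, 0
--     unused: list[Flag] = []
--     for f in flags:
--         match f[0]:
--             case "p1s":
--                 p1s += f[1] if f[1] else duration
--             case "p2":
--                 p2 += f[1] if f[1] else duration
--             case "put":
--                 put += f[1] if f[1] else duration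
--             case "p0":
--                 p0 += f[1] if f[1] else duration
--             case "ins":
--                 ins += f[1] if f[1] else duration
--                 if ins > duration:
--                     raise _VE("Bad instructor flag")
--             case _:
--                 unused.append(f)
--     p1 = duration - (p1s + p2 + put + p0)
--     if p1 < 0:
--         raise _VE("Too many roles")
--     return Roles(p1, p1s, p2, put, ins), tuple(unused)
-- ===== SOURCE B (Python) =====
-- from typing import NamedTuple, Optional
--
-- class Roles(NamedTuple):
--     p1: int = 0
--     p1s: int = 0
--     p2: int = 0
--     put: int = 0
--     instructor: int = 0
--
-- class _VE(Exception):
--     def __init__(self, message): self.message = message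
--
-- def _process_roles(flags, duration):
--     # Incremental instructor check first, in original flag order, so the
--     # "Bad instructor flag" exception takes precedence as in the original.
--     ins = 0
--     for name, v in flags:
--         if name == "ins":
--             ins += v if v else duration
--             if ins > duration:
--                 raise _VE("Bad instructor flag")
--     p1s = sum(v if v else duration for n, v in flags if n == "p1s")
--     p2 = sum(v if v else duration for n, v in flags if n == "p2")
--     put = sum(v if v else duration for n, v in flags if n == "put")
--     p0 = sum(v if v else duration for n, v in flags if n == "p0")
--     unused = tuple(f for f in flags
--                    if f[0] not in ("p1s", "p2", "put", "p0", "ins"))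
--     p1 = duration - (p1s + p2 + put + p0)
--     if p1 < 0:
--         raise _VE("Too many roles")
--     return Roles(p1, p1s, p2, put, ins), unused
-- ===== Notes on version B (the rewrite author's own statement) =====
-- stated objective: idiomatic
-- what changed: Replaced the single stateful match-loop with per-role filtered sum() generators and a filter comprehension for unused flags, keeping only the instructor check as a small incremental loop.
import Mathlib
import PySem

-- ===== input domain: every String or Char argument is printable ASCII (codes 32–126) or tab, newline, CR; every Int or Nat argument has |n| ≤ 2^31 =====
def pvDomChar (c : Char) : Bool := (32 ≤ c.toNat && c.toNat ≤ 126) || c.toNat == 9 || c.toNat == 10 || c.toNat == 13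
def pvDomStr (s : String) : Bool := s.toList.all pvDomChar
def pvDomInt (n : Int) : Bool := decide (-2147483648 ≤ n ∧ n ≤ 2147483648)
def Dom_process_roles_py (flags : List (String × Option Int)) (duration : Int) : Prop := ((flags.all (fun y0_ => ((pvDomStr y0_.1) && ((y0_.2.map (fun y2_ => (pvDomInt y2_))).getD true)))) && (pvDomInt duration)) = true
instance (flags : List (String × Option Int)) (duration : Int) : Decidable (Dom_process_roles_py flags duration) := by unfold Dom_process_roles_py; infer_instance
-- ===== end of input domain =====

-- B replaces A's single stateful match-loop by per-role filtered sums plus a small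
-- incremental instructor loop (objective: idiomatic decomposition, same cost).


-- `x if x else duration` on an Optional[int]: None and 0 are falsy
def pvVal (duration : Int) (v : Option Int) : Int :=
  match v with
  | none => duration
  | some x => if x = 0 then duration else x

-- ===== PORT A =====
-- A's single for-loop over flags; raising is modelled by `none`
def pvLoopA (duration : Int) : List (String × Option Int) → Int → Int → Int → Int → Int →
    List (String × Option Int) → Option ((Int × Int × Int × Int × Int) × List (String × Option Int))
  | [], p1s, p2, put, p0, ins, unused => some ((p1s, p2, put, p0, ins), unused)
  | f :: rest, p1s, p2, put, p0, ins, unused =>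
    if f.1 = "p1s" then pvLoopA duration rest (p1s + pvVal duration f.2) p2 put p0 ins unused
    else if f.1 = "p2" then pvLoopA duration rest p1s (p2 + pvVal duration f.2) put p0 ins unused
    else if f.1 = "put" then pvLoopA duration rest p1s p2 (put + pvVal duration f.2) p0 ins unused
    else if f.1 = "p0" then pvLoopA duration rest p1s p2 put (p0 + pvVal duration f.2) ins unused
    else if f.1 = "ins" then
      let ins' := ins + pvVal duration f.2
      if duration < ins' then none  -- raise _VE("Bad instructor flag"); excluded by Pre_
      else pvLoopA duration rest p1s p2 put p0 ins' unused
    else pvLoopA duration rest p1s p2 put p0 ins (unused ++ [f])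

def process_roles_py (flags : List (String × Option Int)) (duration : Int) :
    (Int × Int × Int × Int × Int) × (List (String × Option Int)) :=
  match pvLoopA duration flags 0 0 0 0 0 [] with
  | none => ((0, 0, 0, 0, 0), [])  -- unreachable under Pre_
  | some ((p1s, p2, put, p0, ins), unused) =>
    let p1 := duration - (p1s + p2 + put + p0)
    if p1 < 0 then ((0, 0, 0, 0, 0), [])  -- raise _VE("Too many roles"); excluded by Pre_
    else ((p1, p1s, p2, put, ins), unused)

-- ===== PORT B =====
-- B's incremental instructor loop; raising is modelled by `none`
def pvInsLoop (duration : Int) : List (String × Option Int) → Int → Option Int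
  | [], ins => some ins
  | f :: rest, ins =>
    if f.1 = "ins" then
      let ins' := ins + pvVal duration f.2
      if duration < ins' then none  -- raise _VE("Bad instructor flag"); excluded by Pre_
      else pvInsLoop duration rest ins'
    else pvInsLoop duration rest ins

-- `sum(v if v else duration for n, v in flags if n == tag)`
def pvSumRole (tag : String) (flags : List (String × Option Int)) (duration : Int) : Int :=
  ((flags.filter (fun f => f.1 == tag)).map (fun f => pvVal duration f.2)).sum

def process_roles_py_alt (flags : List (String × Option Int)) (duration : Int) :
    (Int × Int × Int × Int × Int) × (List (String × Option Int)) :=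
  match pvInsLoop duration flags 0 with
  | none => ((0, 0, 0, 0, 0), [])  -- unreachable under Pre_
  | some ins =>
    let p1s := pvSumRole "p1s" flags duration
    let p2 := pvSumRole "p2" flags duration
    let put := pvSumRole "put" flags duration
    let p0 := pvSumRole "p0" flags duration
    let unused := flags.filter (fun f =>
      ¬ (f.1 = "p1s" ∨ f.1 = "p2" ∨ f.1 = "put" ∨ f.1 = "p0" ∨ f.1 = "ins"))
    let p1 := duration - (p1s + p2 + put + p0)
    if p1 < 0 then ((0, 0, 0, 0, 0), [])  -- raise _VE("Too many roles"); excluded by Pre_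
    else ((p1, p1s, p2, put, ins), unused)

-- ===== PRECONDITION & SPEC =====
-- helper for Pre_ only (independent of either port)
def pvTagS (duration : Int) (tag : String) (l : List (String × Option Int)) : Int :=
  ((l.filter (fun f => f.1 == tag)).map (fun f => pvVal duration f.2)).sum

-- Pre_ excludes exactly the inputs on which A raises _VE: some prefix ending in an
-- "ins" flag whose instructor total exceeds duration, or role totals exceeding duration.
def Pre_process_roles_py (flags : List (String × Option Int)) (duration : Int) : Prop :=
  (∀ i : ℕ, (h : i < flags.length) → (flags[i]'h).1 = "ins" →
      pvTagS duration "ins" (flags.take (i + 1)) ≤ duration)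
  ∧ 0 ≤ duration - (pvTagS duration "p1s" flags + pvTagS duration "p2" flags
      + pvTagS duration "put" flags + pvTagS duration "p0" flags)

instance (flags : List (String × Option Int)) (duration : Int) :
    Decidable (Pre_process_roles_py flags duration) := by
  unfold Pre_process_roles_py; infer_instance

def pvWitness_process_roles_py : (List (String × Option Int)) × Int :=
  ([("p1s", some 10), ("night", none), ("ins", some 5)], 30)

def Spec_process_roles_py (flags : List (String × Option Int)) (duration : Int) (out : (Int × Int × Int × Int × Int) × (List (String × Option Int))) : Prop := out = process_roles_py_alt flags duration
instance (flags : List (String × Option Int)) (duration : Int) (out : (Int × Int × Int × Int × Int) × (List (String × Option Int))) : Decidable (Spec_process_roles_py flags duration out) := by unfold Spec_process_roles_py; infer_instance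

-- ===== CLAIM (what is proved, stated in full; the proofs are below) =====
def Claim_equal_process_roles_py : Prop := ∀ (flags : List (String × Option Int)) (duration : Int), Dom_process_roles_py flags duration → Pre_process_roles_py flags duration → Spec_process_roles_py flags duration (process_roles_py flags duration)

-- ===== LEMMAS AND PROOFS =====

-- A's loop state decomposes into B's four filtered sums, the instructor loop
-- and the unused filter.
theorem pvLoopA_decomp (duration : Int) (flags : List (String × Option Int)) :
    ∀ p1s p2 put p0 ins unused,
    pvLoopA duration flags p1s p2 put p0 ins unused =
      (pvInsLoop duration flags ins).map (fun insF =>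
        ((p1s + pvSumRole "p1s" flags duration,
          p2 + pvSumRole "p2" flags duration,
          put + pvSumRole "put" flags duration,
          p0 + pvSumRole "p0" flags duration,
          insF),
         unused ++ flags.filter (fun f =>
           ¬ (f.1 = "p1s" ∨ f.1 = "p2" ∨ f.1 = "put" ∨ f.1 = "p0" ∨ f.1 = "ins")))) := by
  induction flags with
  | nil => intro p1s p2 put p0 ins unused; simp [pvLoopA, pvInsLoop, pvSumRole]
  | cons f rest ih =>
    intro p1s p2 put p0 ins unused
    by_cases h1 : f.1 = "p1s"
    · rw [show pvLoopA duration (f::rest) p1s p2 put p0 ins unused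
          = pvLoopA duration rest (p1s + pvVal duration f.2) p2 put p0 ins unused by
        simp [pvLoopA, h1], ih,
        show pvInsLoop duration (f::rest) ins = pvInsLoop duration rest ins by
          simp [pvInsLoop, h1]]
      cases pvInsLoop duration rest ins <;>
        simp [pvSumRole, pvInsLoop, h1, List.filter_cons, add_assoc]
    · by_cases h2 : f.1 = "p2"
      · rw [show pvLoopA duration (f::rest) p1s p2 put p0 ins unused
            = pvLoopA duration rest p1s (p2 + pvVal duration f.2) put p0 ins unused by
          simp [pvLoopA, h1, h2], ih,
          show pvInsLoop duration (f::rest) ins = pvInsLoop duration rest ins by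
            simp [pvInsLoop, h2]]
        cases pvInsLoop duration rest ins <;>
          simp [pvSumRole, pvInsLoop, h1, h2, List.filter_cons, add_assoc]
      · by_cases h3 : f.1 = "put"
        · rw [show pvLoopA duration (f::rest) p1s p2 put p0 ins unused
              = pvLoopA duration rest p1s p2 (put + pvVal duration f.2) p0 ins unused by
            simp [pvLoopA, h1, h2, h3], ih,
            show pvInsLoop duration (f::rest) ins = pvInsLoop duration rest ins by
              simp [pvInsLoop, h3]]
          cases pvInsLoop duration rest ins <;>
            simp [pvSumRole, pvInsLoop, h1, h2, h3, List.filter_cons, add_assoc]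
        · by_cases h4 : f.1 = "p0"
          · rw [show pvLoopA duration (f::rest) p1s p2 put p0 ins unused
                = pvLoopA duration rest p1s p2 put (p0 + pvVal duration f.2) ins unused by
              simp [pvLoopA, h1, h2, h3, h4], ih,
              show pvInsLoop duration (f::rest) ins = pvInsLoop duration rest ins by
                simp [pvInsLoop, h4]]
            cases pvInsLoop duration rest ins <;>
              simp [pvSumRole, pvInsLoop, h1, h2, h3, h4, List.filter_cons, add_assoc]
          · by_cases h5 : f.1 = "ins"
            · by_cases hlt : duration < ins + pvVal duration f.2
              · simp [pvLoopA, pvInsLoop, h1, h2, h3, h4, h5, hlt]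
              · rw [show pvLoopA duration (f::rest) p1s p2 put p0 ins unused
                    = pvLoopA duration rest p1s p2 put p0 (ins + pvVal duration f.2) unused by
                  simp [pvLoopA, h1, h2, h3, h4, h5, hlt], ih,
                  show pvInsLoop duration (f::rest) ins
                      = pvInsLoop duration rest (ins + pvVal duration f.2) by
                    simp [pvInsLoop, h5, hlt]]
                cases pvInsLoop duration rest (ins + pvVal duration f.2) <;>
                  simp [pvSumRole, pvInsLoop, h1, h2, h3, h4, h5, hlt, List.filter_cons, add_assoc]
            · rw [show pvLoopA duration (f::rest) p1s p2 put p0 ins unused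
                  = pvLoopA duration rest p1s p2 put p0 ins (unused ++ [f]) by
                simp [pvLoopA, h1, h2, h3, h4, h5], ih,
                show pvInsLoop duration (f::rest) ins = pvInsLoop duration rest ins by
                  simp [pvInsLoop, h5]]
              cases pvInsLoop duration rest ins <;>
                simp [pvSumRole, pvInsLoop, h1, h2, h3, h4, h5, List.filter_cons, add_assoc]

-- Under the prefix condition the instructor loop never raises and returns the total.
theorem pvInsLoop_some (duration : Int) :
    ∀ (flags : List (String × Option Int)) (ins : Int),
    (∀ i : ℕ, (h : i < flags.length) → (flags[i]'h).1 = "ins" →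
        ins + pvTagS duration "ins" (flags.take (i + 1)) ≤ duration) →
    pvInsLoop duration flags ins = some (ins + pvTagS duration "ins" flags) := by
  intro flags
  induction flags with
  | nil => intro ins _; simp [pvInsLoop, pvTagS]
  | cons f rest ih =>
    intro ins hpre
    by_cases h5 : f.1 = "ins"
    · have h0 := hpre 0 (by simp) (by simpa using h5)
      have hv : pvTagS duration "ins" ((f :: rest).take 1) = pvVal duration f.2 := by
        simp [pvTagS, h5]
      rw [hv] at h0
      have hrest : ∀ i : ℕ, (h : i < rest.length) → (rest[i]'h).1 = "ins" →
          (ins + pvVal duration f.2) + pvTagS duration "ins" (rest.take (i + 1)) ≤ duration := by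
        intro i hi hins
        have := hpre (i + 1) (by simpa using Nat.succ_lt_succ hi) (by simpa using hins)
        simpa [pvTagS, List.filter_cons, h5, add_assoc] using this
      simp only [pvInsLoop, if_pos h5]
      have hnot : ¬ duration < ins + pvVal duration f.2 := not_lt.mpr h0
      simp only [hnot, if_false]
      rw [ih _ hrest]
      simp [pvTagS, h5, add_assoc]
    · have hrest : ∀ i : ℕ, (h : i < rest.length) → (rest[i]'h).1 = "ins" →
          ins + pvTagS duration "ins" (rest.take (i + 1)) ≤ duration := by
        intro i hi hins
        have := hpre (i + 1) (by simpa using Nat.succ_lt_succ hi) (by simpa using hins)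
        simpa [pvTagS, List.filter_cons, h5] using this
      simp only [pvInsLoop, if_neg h5]
      rw [ih _ hrest]
      simp [pvTagS, h5]

-- ===== VERDICT (by name: the statement is the Claim_ definition above) =====
theorem process_roles_py_spec : Claim_equal_process_roles_py := by
  intro flags duration _ hpre
  unfold Spec_process_roles_py process_roles_py process_roles_py_alt
  obtain ⟨hins, _⟩ := hpre
  have h1 : pvInsLoop duration flags 0 = some (0 + pvTagS duration "ins" flags) :=
    pvInsLoop_some duration flags 0 (by intro i h hi; simpa using hins i h hi)
  rw [pvLoopA_decomp, h1]
  simp
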